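-- pv_equiv track=rewrite | github.com/TAU-DB/ATENA-A-EDA | benchamrk/evaluation/distance.py | set_lca
-- ===== SOURCE A (Python) =====
-- def pair_lca(pair1, pair2):
--     k1, v1 = pair1
--     k2, v2 = pair2
--     if k1 == k2:
--         if v1 == v2:
--             return (k1, v1)
--         else:
--             return (k1, None)
--     else:
--         if v1 == v2:
--             return (None, v2)
--         else:
--             return (None, None)
--
-- def set_lca(set1, set2):
--     lca = set()
--     for pair1 in set1:
--         for pair2 in set2:
--             p_lca = pair_lca(pair1, pair2)
--             if p_lca != (None, None):
--                 lca.add(p_lca)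
--
--     lca_temp = set(lca)
--
--     for pair1 in lca_temp:
--         for pair2 in lca_temp:
--             if pair1 == pair2:
--                 continue
--
--             if is_pair_more_general_or_equal(pair1, pair2):
--                 lca.discard(pair1)
--
--     return lca
--
-- def is_pair_more_general_or_equal(pair1, pair2):
--     k1, v1 = pair1
--     k2, v2 = pair2
--     if k1 == k2 and v1 == v2:
--         return True
--     if k1 is None and v1 is None:
--         return True
--     if k1 == k2 and v1 is None:
--         return True
--     if v1 == v2 and k1 is None:
--         return True
--     return False
-- ===== SOURCE B (Python) =====
-- def _cand(pair1, pair2):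
--     k1, v1 = pair1
--     k2, v2 = pair2
--     if k1 == k2:
--         c = (k1, v1) if v1 == v2 else (k1, None)
--     elif v1 == v2:
--         c = (None, v1)
--     else:
--         return None
--     return c if c != (None, None) else None
--
-- def set_lca(set1, set2):
--     # Phase 1: generate candidate generalizations; dedup keeps first occurrences.
--     cands = [c for p1 in set1 for p2 in set2 if (c := _cand(p1, p2)) is not None]
--     s = list(dict.fromkeys(cands))
--     # Phase 2: prune strictly-more-general pairs in one pass using two precomputed indexes.
--     specific_keys = {k for (k, v) in s if v is not None}
--     specific_vals = {v for (k, v) in s if k is not None}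
--     return {(k, v) for (k, v) in s
--             if not (v is None and k in specific_keys)
--             and not (k is None and v in specific_vals)}
-- ===== Notes on version B (the rewrite author's own statement) =====
-- stated objective: alternative
-- what changed: The quadratic pairwise pruning loop over the candidate set is replaced by one linear pass using two precomputed hash sets (keys occurring with a concrete value, values occurring with a concrete key); generation appends candidates into a list deduplicated once instead of inserting into a set.
import Mathlib
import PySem

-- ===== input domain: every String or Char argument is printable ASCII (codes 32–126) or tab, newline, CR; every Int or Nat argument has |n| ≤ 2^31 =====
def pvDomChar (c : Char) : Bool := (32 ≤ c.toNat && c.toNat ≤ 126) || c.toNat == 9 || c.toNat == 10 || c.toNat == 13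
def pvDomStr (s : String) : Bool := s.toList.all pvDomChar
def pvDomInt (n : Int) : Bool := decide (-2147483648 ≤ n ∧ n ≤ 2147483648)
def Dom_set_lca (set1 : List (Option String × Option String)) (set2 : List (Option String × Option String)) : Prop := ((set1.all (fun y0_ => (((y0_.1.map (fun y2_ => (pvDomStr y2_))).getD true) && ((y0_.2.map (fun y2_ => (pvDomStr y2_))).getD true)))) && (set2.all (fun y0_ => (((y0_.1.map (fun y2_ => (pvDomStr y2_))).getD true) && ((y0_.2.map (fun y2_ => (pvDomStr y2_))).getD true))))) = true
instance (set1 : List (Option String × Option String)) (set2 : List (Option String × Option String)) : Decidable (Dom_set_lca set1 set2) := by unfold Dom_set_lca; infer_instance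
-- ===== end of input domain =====

-- B replaces A's pairwise pruning of the candidate set by one pass over it using two
-- precomputed hash sets (objective: alternative). Return values are Python sets, compared as sets.

-- ===== PORT A =====
def pair_lca (p1 p2 : Option String × Option String) : Option String × Option String :=
  if p1.1 = p2.1 then
    if p1.2 = p2.2 then (p1.1, p1.2) else (p1.1, none)
  else
    if p1.2 = p2.2 then (none, p2.2) else (none, none)

def is_pair_more_general_or_equal (p1 p2 : Option String × Option String) : Bool :=
  if p1.1 = p2.1 ∧ p1.2 = p2.2 then true
  else if p1.1 = none ∧ p1.2 = none then true
  else if p1.1 = p2.1 ∧ p1.2 = none then true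
  else if p1.2 = p2.2 ∧ p1.1 = none then true
  else false

def set_lca (set1 : List (Option String × Option String)) (set2 : List (Option String × Option String)) : List (Option String × Option String) :=
  let lca : PySem.Set (Option String × Option String) :=
    set1.foldl (fun acc p1 =>
      set2.foldl (fun acc p2 =>
        let p := pair_lca p1 p2
        if p ≠ ((none, none) : Option String × Option String) then PySem.Set.add acc p else acc)
        acc)
      PySem.Set.empty
  let lca_temp : PySem.Set (Option String × Option String) := lca
  -- iterating lca_temp only discards elements of lca, so the resulting SET does not depend on
  -- Python's hash iteration order
  lca_temp.foldl (fun acc p1 =>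
    lca_temp.foldl (fun acc p2 =>
      if p1 = p2 then acc
      else if is_pair_more_general_or_equal p1 p2 then PySem.Set.discard acc p1 else acc)
      acc)
    lca

-- ===== PORT B =====
-- B-side helper: Python's _cand(pair1, pair2)
def cand_lca (p1 p2 : Option String × Option String) : Option (Option String × Option String) :=
  let c? : Option (Option String × Option String) :=
    if p1.1 = p2.1 then some (if p1.2 = p2.2 then (p1.1, p1.2) else (p1.1, none))
    else if p1.2 = p2.2 then some (none, p1.2)
    else none
  match c? with
  | some c => if c ≠ ((none, none) : Option String × Option String) then some c else none
  | none => none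

def set_lca_alt (set1 : List (Option String × Option String)) (set2 : List (Option String × Option String)) : List (Option String × Option String) :=
  let cands : List (Option String × Option String) :=
    set1.flatMap (fun p1 => set2.filterMap (fun p2 => cand_lca p1 p2))
  let s := PySem.List.dedup cands
  let specific_keys : PySem.Set (Option String) :=
    PySem.Set.ofList (s.filterMap (fun p => if p.2 ≠ none then some p.1 else none))
  let specific_vals : PySem.Set (Option String) :=
    PySem.Set.ofList (s.filterMap (fun p => if p.1 ≠ none then some p.2 else none))
  s.foldl (fun acc (p : Option String × Option String) =>
    if ¬(p.2 = none ∧ PySem.Set.contains specific_keys p.1 = true) ∧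
       ¬(p.1 = none ∧ PySem.Set.contains specific_vals p.2 = true)
    then PySem.Set.add acc p else acc) PySem.Set.empty

-- ===== PRECONDITION & SPEC =====
def Spec_set_lca (set1 : List (Option String × Option String)) (set2 : List (Option String × Option String)) (out : List (Option String × Option String)) : Prop := out = set_lca_alt set1 set2
instance (set1 : List (Option String × Option String)) (set2 : List (Option String × Option String)) (out : List (Option String × Option String)) : Decidable (Spec_set_lca set1 set2 out) := by unfold Spec_set_lca; infer_instance

-- ===== CLAIM (what is proved, stated in full; the proofs are below) =====
def Claim_equal_set_lca : Prop := ∀ (set1 : List (Option String × Option String)) (set2 : List (Option String × Option String)), Dom_set_lca set1 set2 → Spec_set_lca set1 set2 (set_lca set1 set2)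

-- ===== LEMMAS AND PROOFS =====

-- A's per-pair generation step emits exactly B's cand_lca
lemma cand_eq (p1 p2 : Option String × Option String) :
    cand_lca p1 p2 =
      (if pair_lca p1 p2 ≠ ((none, none) : Option String × Option String)
       then some (pair_lca p1 p2) else none) := by
  obtain ⟨k1, v1⟩ := p1; obtain ⟨k2, v2⟩ := p2
  simp only [cand_lca, pair_lca]
  by_cases hk : k1 = k2 <;> by_cases hv : v1 = v2 <;> simp [hk, hv]

-- folding a guarded add is folding add over the filterMap
lemma foldl_add_filterMap {α β : Type} [BEq α] [LawfulBEq α]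
    (f : β → Option α) (l : List β) (acc : PySem.Set α) :
    l.foldl (fun acc x => match f x with
      | some c => PySem.Set.add acc c
      | none => acc) acc
      = (l.filterMap f).foldl PySem.Set.add acc := by
  induction l generalizing acc with
  | nil => rfl
  | cons x l ih => cases h : f x <;> simp [h, ih]

lemma gen_eq (set1 set2 : List (Option String × Option String))
    (acc : PySem.Set (Option String × Option String)) :
    set1.foldl (fun acc p1 =>
        set2.foldl (fun acc p2 =>
          let p := pair_lca p1 p2
          if p ≠ ((none, none) : Option String × Option String) then PySem.Set.add acc p else acc)
          acc) acc
      = (set1.flatMap (fun p1 => set2.filterMap (fun p2 => cand_lca p1 p2))).foldl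
          PySem.Set.add acc := by
  induction set1 generalizing acc with
  | nil => rfl
  | cons p1 l ih =>
      simp only [List.foldl_cons, List.flatMap_cons, List.foldl_append, ih]
      congr 1
      rw [← foldl_add_filterMap (fun p2 => cand_lca p1 p2)]
      refine PySem.List.foldl_congr_mem _ _ _ _ (fun acc p2 _ => ?_)
      rw [cand_eq]
      by_cases h : pair_lca p1 p2 = ((none, none) : Option String × Option String) <;> simp [h]

-- the pruning condition of A over the snapshot s, as a boolean
def pvRemB (s : List (Option String × Option String)) (p : Option String × Option String) : Bool :=
  s.any (fun q => !decide (p = q) && is_pair_more_general_or_equal p q)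

lemma pvRemB_iff (s : List (Option String × Option String)) (p : Option String × Option String) :
    pvRemB s p = true ↔ ∃ q ∈ s, ¬(p = q) ∧ is_pair_more_general_or_equal p q = true := by
  simp [pvRemB]

-- A's inner pruning loop discards p1 iff some element of the snapshot triggers
lemma inner_prune_eq (p1 : Option String × Option String)
    (l : List (Option String × Option String)) (acc : PySem.Set (Option String × Option String)) :
    l.foldl (fun acc p2 =>
        if p1 = p2 then acc
        else if is_pair_more_general_or_equal p1 p2 then PySem.Set.discard acc p1 else acc) acc
      = if pvRemB l p1 = true then PySem.Set.discard acc p1 else acc := by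
  induction l generalizing acc with
  | nil => simp [pvRemB]
  | cons p2 l ih =>
      have hdd : PySem.Set.discard (PySem.Set.discard acc p1) p1 = PySem.Set.discard acc p1 := by
        simp [PySem.Set.discard, List.filter_filter]
      by_cases he : p1 = p2
      · have h2 : pvRemB (p2 :: l) p1 = pvRemB l p1 := by simp [pvRemB, he]
        simp only [List.foldl_cons, if_pos he, ih, h2]
      · by_cases hg : is_pair_more_general_or_equal p1 p2 = true
        · have hrem : pvRemB (p2 :: l) p1 = true := by simp [pvRemB, he, hg]
          simp only [List.foldl_cons, if_neg he, if_pos hg, ih, if_pos hrem]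
          by_cases h : pvRemB l p1 = true <;> simp [h, hdd]
        · have h2 : pvRemB (p2 :: l) p1 = pvRemB l p1 := by simp [pvRemB, hg]
          simp only [List.foldl_cons, if_neg he, if_neg hg, ih, h2]

-- folding conditional discards over a traversal list filters the accumulator
lemma outer_prune_eq (s : List (Option String × Option String))
    (l : List (Option String × Option String)) (acc : PySem.Set (Option String × Option String)) :
    l.foldl (fun acc p1 => if pvRemB s p1 = true then PySem.Set.discard acc p1 else acc) acc
      = acc.filter (fun x => !(pvRemB s x && decide (x ∈ l))) := by
  induction l generalizing acc with
  | nil => simp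
  | cons p l ih =>
      simp only [List.foldl_cons, ih]
      by_cases hp : pvRemB s p = true
      · simp only [if_pos hp, PySem.Set.discard, List.filter_filter]
        refine List.filter_congr (fun x _ => ?_)
        by_cases hx : x = p
        · subst hx; simp [hp]
        · simp [hx]
      · simp only [if_neg hp]
        refine List.filter_congr (fun x _ => ?_)
        by_cases hx : x = p
        · subst hx; simp [hp]
        · simp [hx]

-- B's final guarded-add loop over a Nodup list is a plain filter
lemma filterMap_if_eq_filter {α : Type} (c : α → Bool) (l : List α) :
    l.filterMap (fun x => if c x = true then some x else none) = l.filter c := by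
  induction l with
  | nil => rfl
  | cons x l ih => by_cases hc : c x = true <;> simp [hc, ih]

lemma guarded_add_eq_filter {α : Type} [BEq α] [LawfulBEq α]
    (c : α → Bool) (l : List α) (h : l.Nodup) :
    l.foldl (fun acc p => if c p then PySem.Set.add acc p else acc) PySem.Set.empty
      = l.filter c := by
  have h1 : l.foldl (fun acc p => if c p then PySem.Set.add acc p else acc) PySem.Set.empty
      = (l.filterMap (fun x => if c x = true then some x else none)).foldl PySem.Set.add
          PySem.Set.empty := by
    rw [← foldl_add_filterMap]
    refine PySem.List.foldl_congr_mem _ _ _ _ (fun acc x _ => ?_)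
    by_cases hc : c x = true <;> simp [hc]
  rw [h1, filterMap_if_eq_filter]
  show PySem.Set.ofList (l.filter c) = l.filter c
  exact PySem.Set.ofList_eq_self_of_nodup _ (h.filter c)

-- the generated candidates never contain (none, none)
lemma cand_ne_none (p1 p2 c : Option String × Option String) (h : cand_lca p1 p2 = some c) :
    c ≠ ((none, none) : Option String × Option String) := by
  rw [cand_eq] at h
  by_cases hp : pair_lca p1 p2 = ((none, none) : Option String × Option String)
  · simp [hp] at h
  · simp [hp] at h; subst h; exact hp

-- characterisation of A's removal condition on a set without (none, none)
lemma rem_iff (s : List (Option String × Option String)) (p : Option String × Option String)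
    (hp : p ≠ ((none, none) : Option String × Option String)) :
    pvRemB s p = true ↔
      (p.2 = none ∧ ∃ q ∈ s, q.1 = p.1 ∧ q.2 ≠ none) ∨
      (p.1 = none ∧ ∃ q ∈ s, q.2 = p.2 ∧ q.1 ≠ none) := by
  rw [pvRemB_iff]
  obtain ⟨k, v⟩ := p
  constructor
  · rintro ⟨⟨k', v'⟩, hq, hne, hg⟩
    simp only [is_pair_more_general_or_equal] at hg
    split_ifs at hg with h1 h2 h3 h4
    · exact absurd (Prod.ext_iff.mpr ⟨h1.1, h1.2⟩) hne
    · exact absurd (Prod.ext_iff.mpr ⟨h2.1, h2.2⟩) hp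
    · left
      refine ⟨h3.2, ⟨k', v'⟩, hq, h3.1.symm, fun hv' => ?_⟩
      have hv'' : v' = none := by simpa using hv'
      exact hne (Prod.ext_iff.mpr ⟨h3.1, by simp [h3.2, hv'']⟩)
    · right
      refine ⟨h4.2, ⟨k', v'⟩, hq, h4.1.symm, fun hk' => ?_⟩
      have hk'' : k' = none := by simpa using hk'
      exact hne (Prod.ext_iff.mpr ⟨by simp [h4.2, hk''], h4.1⟩)
  · rintro (⟨hv, ⟨k', v'⟩, hq, hk', hv'⟩ | ⟨hk, ⟨k', v'⟩, hq, hv', hk'⟩)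
    · refine ⟨⟨k', v'⟩, hq, ?_, ?_⟩
      · intro h; rw [Prod.ext_iff] at h
        exact hv' (by simpa using h.2.symm.trans hv)
      · subst hv; simp only [is_pair_more_general_or_equal]
        split_ifs with h1 h2 h3 <;> simp_all
    · refine ⟨⟨k', v'⟩, hq, ?_, ?_⟩
      · intro h; rw [Prod.ext_iff] at h
        exact hk' (by simpa using h.1.symm.trans hk)
      · subst hk; simp only [is_pair_more_general_or_equal]
        split_ifs with h1 h2 h3 h4 <;> simp_all

-- every element of the candidate set differs from (none, none)
lemma mem_cands_ne (set1 set2 : List (Option String × Option String))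
    (x : Option String × Option String)
    (hx : x ∈ PySem.List.dedup
        (set1.flatMap (fun p1 => set2.filterMap (fun p2 => cand_lca p1 p2)))) :
    x ≠ ((none, none) : Option String × Option String) := by
  rw [PySem.List.dedup_eq_ofList, PySem.Set.mem_ofList] at hx
  rcases List.mem_flatMap.mp hx with ⟨p1, _, hx1⟩
  rcases List.mem_filterMap.mp hx1 with ⟨p2, _, hx2⟩
  exact cand_ne_none p1 p2 x hx2

-- ===== VERDICT (by name: the statement is the Claim_ definition above) =====
theorem set_lca_spec : Claim_equal_set_lca := by
  intro set1 set2 _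
  show set_lca set1 set2 = set_lca_alt set1 set2
  unfold set_lca set_lca_alt
  dsimp only
  rw [gen_eq]
  have h0 : (set1.flatMap (fun p1 => set2.filterMap (fun p2 => cand_lca p1 p2))).foldl
      PySem.Set.add PySem.Set.empty
      = PySem.List.dedup (set1.flatMap (fun p1 => set2.filterMap (fun p2 => cand_lca p1 p2))) := by
    rw [PySem.List.dedup_eq_ofList, PySem.Set.ofList_eq_foldl]; rfl
  rw [h0]
  set s := PySem.List.dedup (set1.flatMap (fun p1 => set2.filterMap (fun p2 => cand_lca p1 p2)))
    with hs
  -- A's pruning phase = filter by ¬ pvRem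
  have hA : (s.foldl (fun acc p1 =>
      s.foldl (fun acc p2 =>
        if p1 = p2 then acc
        else if is_pair_more_general_or_equal p1 p2 then PySem.Set.discard acc p1 else acc)
        acc) s)
      = s.filter (fun x => !pvRemB s x) := by
    have h1 : (s.foldl (fun acc p1 =>
        s.foldl (fun acc p2 =>
          if p1 = p2 then acc
          else if is_pair_more_general_or_equal p1 p2 then PySem.Set.discard acc p1 else acc)
          acc) s)
        = s.foldl (fun acc p1 => if pvRemB s p1 = true then PySem.Set.discard acc p1 else acc) s := by
      refine PySem.List.foldl_congr_mem _ _ _ _ (fun acc p1 _ => ?_)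
      exact inner_prune_eq p1 s acc
    rw [h1, outer_prune_eq]
    refine List.filter_congr (fun x hx => ?_)
    simp [hx]
  -- B's pruning phase = filter by the indexed condition
  have hB : (s.foldl (fun acc (p : Option String × Option String) =>
        if ¬(p.2 = none ∧ PySem.Set.contains
              (PySem.Set.ofList (s.filterMap (fun p => if p.2 ≠ none then some p.1 else none))) p.1 = true) ∧
           ¬(p.1 = none ∧ PySem.Set.contains
              (PySem.Set.ofList (s.filterMap (fun p => if p.1 ≠ none then some p.2 else none))) p.2 = true)
        then PySem.Set.add acc p else acc) PySem.Set.empty)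
      = s.filter (fun p =>
          decide (¬(p.2 = none ∧ PySem.Set.contains
              (PySem.Set.ofList (s.filterMap (fun p => if p.2 ≠ none then some p.1 else none))) p.1 = true) ∧
           ¬(p.1 = none ∧ PySem.Set.contains
              (PySem.Set.ofList (s.filterMap (fun p => if p.1 ≠ none then some p.2 else none))) p.2 = true))) := by
    have hc : ∀ (acc : PySem.Set (Option String × Option String))
        (p : Option String × Option String), p ∈ s →
        (if ¬(p.2 = none ∧ PySem.Set.contains
              (PySem.Set.ofList (s.filterMap (fun p => if p.2 ≠ none then some p.1 else none))) p.1 = true) ∧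
           ¬(p.1 = none ∧ PySem.Set.contains
              (PySem.Set.ofList (s.filterMap (fun p => if p.1 ≠ none then some p.2 else none))) p.2 = true)
        then PySem.Set.add acc p else acc)
        = (if (fun (p : Option String × Option String) =>
            decide (¬(p.2 = none ∧ PySem.Set.contains
              (PySem.Set.ofList (s.filterMap (fun p => if p.2 ≠ none then some p.1 else none))) p.1 = true) ∧
           ¬(p.1 = none ∧ PySem.Set.contains
              (PySem.Set.ofList (s.filterMap (fun p => if p.1 ≠ none then some p.2 else none))) p.2 = true))) p
            = true
           then PySem.Set.add acc p else acc) := by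
      intro acc p _
      exact if_congr (Iff.symm decide_eq_true_iff) rfl rfl
    rw [PySem.List.foldl_congr_mem _ _ _ _ hc]
    exact guarded_add_eq_filter _ s (PySem.List.nodup_dedup _)
  rw [hA, hB]
  refine List.filter_congr (fun x hx => ?_)
  have hne : x ≠ ((none, none) : Option String × Option String) := mem_cands_ne set1 set2 x hx
  have hkeys : (PySem.Set.contains
      (PySem.Set.ofList (s.filterMap (fun p => if p.2 ≠ none then some p.1 else none))) x.1 = true)
      ↔ ∃ q ∈ s, q.1 = x.1 ∧ q.2 ≠ none := by
    rw [PySem.Set.contains_iff, PySem.Set.mem_ofList, List.mem_filterMap]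
    constructor
    · rintro ⟨q, hq, hqe⟩
      by_cases h : q.2 = none
      · simp [h] at hqe
      · simp [h] at hqe; exact ⟨q, hq, hqe, h⟩
    · rintro ⟨q, hq, hq1, hq2⟩; exact ⟨q, hq, by simp [hq2, hq1]⟩
  have hvals : (PySem.Set.contains
      (PySem.Set.ofList (s.filterMap (fun p => if p.1 ≠ none then some p.2 else none))) x.2 = true)
      ↔ ∃ q ∈ s, q.2 = x.2 ∧ q.1 ≠ none := by
    rw [PySem.Set.contains_iff, PySem.Set.mem_ofList, List.mem_filterMap]
    constructor
    · rintro ⟨q, hq, hqe⟩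
      by_cases h : q.1 = none
      · simp [h] at hqe
      · simp [h] at hqe; exact ⟨q, hq, hqe, h⟩
    · rintro ⟨q, hq, hq1, hq2⟩; exact ⟨q, hq, by simp [hq2, hq1]⟩
  rw [Bool.eq_iff_iff, Bool.not_eq_true', Bool.eq_false_iff]
  simp only [decide_eq_true_eq]
  rw [Ne, rem_iff s x hne, not_or, hkeys, hvals]
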